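-- pv_equiv track=rewrite | github.com/ihanwen99/vldb26-demo | demo_backend.py | merge_tree_left_deep
-- ===== SOURCE A (Python) =====
-- from typing import Dict, Iterable, List, Tuple
--
-- def merge_tree_left_deep(partitions: List[Dict[str, object]]) -> List[Tuple[int, ...]]:
--     order = []
--     current = (partitions[0]["id"],)
--     for partition in partitions[1:]:
--         nxt = current + (partition["id"],)
--         order.append(nxt)
--         current = nxt
--     return order
-- ===== SOURCE B (Python) =====
-- def merge_tree_left_deep(partitions):
--     ids = [p["id"] for p in partitions]
--     return [tuple(ids[:i]) for i in range(2, len(ids) + 1)]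
-- ===== Notes on version B (the rewrite author's own statement) =====
-- stated objective: simpler
-- what changed: B first materializes the id list in one pass, then produces the answer as prefix slices ids[:i] for i in 2..n, instead of A's running-accumulator loop that grows a tuple and appends it to an order list.
import Mathlib
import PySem

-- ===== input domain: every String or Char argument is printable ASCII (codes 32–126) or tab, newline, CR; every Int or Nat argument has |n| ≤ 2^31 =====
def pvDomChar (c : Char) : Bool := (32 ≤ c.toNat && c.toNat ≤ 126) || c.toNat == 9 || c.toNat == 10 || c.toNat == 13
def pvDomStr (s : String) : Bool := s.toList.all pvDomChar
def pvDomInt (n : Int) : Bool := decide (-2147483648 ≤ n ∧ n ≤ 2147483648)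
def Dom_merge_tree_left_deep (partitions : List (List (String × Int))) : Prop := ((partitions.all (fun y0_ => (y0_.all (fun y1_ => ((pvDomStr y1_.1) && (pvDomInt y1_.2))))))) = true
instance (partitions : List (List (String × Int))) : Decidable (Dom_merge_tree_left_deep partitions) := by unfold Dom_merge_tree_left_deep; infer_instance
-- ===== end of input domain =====

-- B builds the result as prefix slices of a materialized id list instead of A's running-accumulator loop; objective: simpler.


-- ===== PORT A =====
-- partition["id"]: first-match association-list lookup; Pre_ guarantees the key is present,
-- so the getD default 0 is never consulted inside Pre_.
def pvId (p : List (String × Int)) : Int := ((PySem.Dict.mk p).get? "id").getD 0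

def merge_tree_left_deep (partitions : List (List (String × Int))) : List (List Int) :=
  match partitions with
  | [] => []  -- Python raises IndexError here; excluded by Pre_
  | p0 :: rest =>
    -- order = []; current = (partitions[0]["id"],); for partition in partitions[1:]: …
    (rest.foldl
      (fun (st : List (List Int) × List Int) partition =>
        let nxt := st.2 ++ [pvId partition]
        (st.1 ++ [nxt], nxt))
      ([], [pvId p0])).1

-- ===== PORT B =====
def merge_tree_left_deep_alt (partitions : List (List (String × Int))) : List (List Int) :=
  let ids := partitions.map pvId
  (PySem.List.pyRange 2 ((ids.length : Int) + 1) 1).map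
    (fun i => PySem.List.slice ids none (some i))

-- ===== PRECONDITION & SPEC =====
-- Pre_ excludes the empty list (A raises IndexError on partitions[0]) and partitions
-- lacking the "id" key (A raises KeyError).
def Pre_merge_tree_left_deep (partitions : List (List (String × Int))) : Prop :=
  partitions ≠ [] ∧ ∀ p ∈ partitions, ((PySem.Dict.mk p).get? "id").isSome = true
instance (partitions : List (List (String × Int))) : Decidable (Pre_merge_tree_left_deep partitions) := by unfold Pre_merge_tree_left_deep; infer_instance
def pvWitness_merge_tree_left_deep : (List (List (String × Int))) := [[("id", 1)], [("id", 2)], [("id", 3)]]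

def Spec_merge_tree_left_deep (partitions : List (List (String × Int))) (out : List (List Int)) : Prop := out = merge_tree_left_deep_alt partitions
instance (partitions : List (List (String × Int))) (out : List (List Int)) : Decidable (Spec_merge_tree_left_deep partitions out) := by unfold Spec_merge_tree_left_deep; infer_instance

-- ===== CLAIM =====
def Claim_equal_merge_tree_left_deep : Prop := ∀ (partitions : List (List (String × Int))), Dom_merge_tree_left_deep partitions → Pre_merge_tree_left_deep partitions → Spec_merge_tree_left_deep partitions (merge_tree_left_deep partitions)

-- ===== LEMMAS AND PROOFS =====

-- The growing-prefix list A's loop produces, as a structural recursion.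
def pvPrefixes (cur : List Int) : List Int → List (List Int)
  | [] => []
  | x :: xs => (cur ++ [x]) :: pvPrefixes (cur ++ [x]) xs

theorem pvFoldl_eq_prefixes (rest : List (List (String × Int))) (acc : List (List Int)) (cur : List Int) :
    (rest.foldl
      (fun (st : List (List Int) × List Int) partition =>
        let nxt := st.2 ++ [pvId partition]
        (st.1 ++ [nxt], nxt))
      (acc, cur)).1 = acc ++ pvPrefixes cur (rest.map pvId) := by
  induction rest generalizing acc cur with
  | nil => simp [pvPrefixes]
  | cons p ps ih => simp [List.foldl, pvPrefixes, ih, List.append_assoc]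

-- B's map over the range, in terms of take.
theorem pvAlt_eq_take (ids : List Int) :
    (PySem.List.pyRange 2 ((ids.length : Int) + 1) 1).map
      (fun i => PySem.List.slice ids none (some i))
    = (List.range (ids.length - 1)).map (fun k => ids.take (k + 2)) := by
  have h : ((ids.length : Int) + 1 - 2).toNat = ids.length - 1 := by omega
  rw [PySem.List.pyRange_one, List.map_map, h]
  apply List.map_congr_left
  intro k _
  show PySem.List.slice ids none (some ((2 : Int) + (k : Int))) = ids.take (k + 2)
  have : (2 : Int) + (k : Int) = ((k + 2 : Nat) : Int) := by push_cast; ring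
  rw [this, PySem.List.slice_to_natCast]

-- prefixes agree with take on a nonempty ids list
theorem pvPrefixes_eq_take (tl : List Int) (pre : List Int) :
    pvPrefixes pre tl = (List.range tl.length).map (fun k => pre ++ tl.take (k + 1)) := by
  induction tl generalizing pre with
  | nil => simp [pvPrefixes]
  | cons x xs ih =>
    simp only [pvPrefixes, List.length_cons, List.range_succ_eq_map, List.map_cons, List.map_map]
    congr 1
    rw [ih (pre ++ [x])]
    apply List.map_congr_left
    intro k _
    simp [Function.comp, List.take_succ_cons, List.append_assoc]

theorem merge_tree_left_deep_eq (partitions : List (List (String × Int)))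
    (h : partitions ≠ []) :
    merge_tree_left_deep partitions = merge_tree_left_deep_alt partitions := by
  match partitions with
  | [] => exact absurd rfl h
  | p0 :: rest =>
    show (rest.foldl _ ([], [pvId p0])).1 = _
    rw [pvFoldl_eq_prefixes rest [] [pvId p0]]
    unfold merge_tree_left_deep_alt
    rw [pvAlt_eq_take]
    rw [pvPrefixes_eq_take (rest.map pvId) [pvId p0]]
    simp only [List.nil_append, List.map_cons, List.length_cons, List.length_map,
      Nat.add_sub_cancel]
    apply List.map_congr_left
    intro k _
    simp [List.take_succ_cons]

-- ===== VERDICT =====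
theorem merge_tree_left_deep_spec : Claim_equal_merge_tree_left_deep := by
  intro partitions _ hpre
  unfold Spec_merge_tree_left_deep
  exact merge_tree_left_deep_eq partitions hpre.1
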